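-- pv_equiv track=rewrite | github.com/podkidyshev/health-weather_correlation | src_orig/Эталоны 60 дней/Групповой_эталон-образец_анализ-амплитуд.py | sequence_distance
-- ===== SOURCE A (Python) =====
-- def sequence_distance(x, y):
--     """вычисление расстояний от максимумов образца до ближайшего максимума эталона"""
--     u = []
--     for i in range(len(x)):
--         if x[i] != 0:
--             for j in range(len(y)):
--                 if ( i - j >= 0 and y[i - j ] != 0) and ( i + j < len(y) and y[i + j ] != 0):
--                     if j == 0:
--                         u.append(j)
--                     else:
--                         u.append(j)
--                         u.append(-j)
--                     break
--                 elif ( i - j >= 0 and y[i - j ] != 0) :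
--                     u.append(j)
--                     break
--                 elif ( i + j < len(y)  and y[i + j ] != 0):
--                     u.append(-j)
--                     break
--     return u
-- ===== SOURCE B (Python) =====
-- def _sweep(y):
--     """out[i] = distance from i back to the latest nonzero index <= i (None if none yet)."""
--     out = []
--     last = None
--     for i, v in enumerate(y):
--         if v != 0:
--             last = i
--         out.append(None if last is None else i - last)
--     return out
--
--
-- def sequence_distance(x, y):
--     """вычисление расстояний от максимумов образца до ближайшего максимума эталона"""
--     if not y:
--         return []
--     left = _sweep(y)               # distance to nearest nonzero on the left (<= i)
--     right = _sweep(list(reversed(y)))  # distance to nearest nonzero on the right (>= i)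
--     right.reverse()
--     u = []
--     for i, v in enumerate(x):
--         if v != 0:
--             lf = left[i]
--             rt = right[i]
--             if lf is None:
--                 if rt is not None:
--                     u.append(-rt)
--             elif rt is None or lf < rt:
--                 u.append(lf)
--             elif rt < lf:
--                 u.append(-rt)
--             else:
--                 u.append(lf)
--                 if lf:
--                     u.append(-lf)
--     return u
-- ===== Notes on version B (the rewrite author's own statement) =====
-- stated objective: alternative
-- what changed: Instead of A's inner scan over y per nonzero sample position, B precomputes in two linear sweeps the distance from every position to the nearest nonzero y-index on the left and on the right, then answers each position by comparing its two table entries; worst-case cost drops from O(len(x)*len(y)) to O(len(x)+len(y)), though A's early break makes the measured difference on random inputs below the 1.5x threshold.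
import Mathlib
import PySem

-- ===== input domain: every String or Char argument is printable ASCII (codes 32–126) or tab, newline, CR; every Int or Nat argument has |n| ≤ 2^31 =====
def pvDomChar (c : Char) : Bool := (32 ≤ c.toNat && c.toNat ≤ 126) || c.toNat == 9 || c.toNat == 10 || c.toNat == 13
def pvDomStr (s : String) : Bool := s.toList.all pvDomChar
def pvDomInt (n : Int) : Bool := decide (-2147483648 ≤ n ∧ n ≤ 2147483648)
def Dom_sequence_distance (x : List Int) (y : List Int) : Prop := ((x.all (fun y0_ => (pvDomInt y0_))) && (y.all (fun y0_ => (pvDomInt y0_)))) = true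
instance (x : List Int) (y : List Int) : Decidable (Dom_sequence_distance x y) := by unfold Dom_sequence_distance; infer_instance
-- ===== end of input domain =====

-- B replaces A's inner linear scan per nonzero sample position by two linear sweeps that tabulate,
-- for every position of y, the distance to the nearest nonzero y-index on the left and on the right.

-- ===== PORT A =====
-- inner 'for j in range(len(y)): ... break' loop of A, returning the elements appended to u for one i
def seqInnerA (y : List Int) (i : Int) : List Int → List Int
  | [] => []
  | j :: js =>
    if (0 ≤ i - j ∧ PySem.List.pyGetD y (i - j) 0 ≠ 0) ∧
       (i + j < (y.length : Int) ∧ PySem.List.pyGetD y (i + j) 0 ≠ 0) then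
      if j = 0 then [j] else [j, -j]
    else if 0 ≤ i - j ∧ PySem.List.pyGetD y (i - j) 0 ≠ 0 then
      [j]
    else if i + j < (y.length : Int) ∧ PySem.List.pyGetD y (i + j) 0 ≠ 0 then
      [-j]
    else seqInnerA y i js

def sequence_distance (x : List Int) (y : List Int) : List Int :=
  (PySem.List.pyRange 0 x.length 1).foldl
    (fun u i =>
      if PySem.List.pyGetD x i 0 ≠ 0 then
        u ++ seqInnerA y i (PySem.List.pyRange 0 y.length 1)
      else u) []

-- ===== PORT B =====
-- one step of _sweep's loop: state = (last, out)
def sweepStep (s : Option Int × List (Option Int)) (p : Int × Int) : Option Int × List (Option Int) :=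
  let last := if p.2 ≠ 0 then some p.1 else s.1
  (last, s.2 ++ [last.map (fun q => p.1 - q)])

def sweep (y : List Int) : List (Option Int) :=
  ((PySem.List.enumerate y).foldl sweepStep (none, [])).2

def sequence_distance_alt (x : List Int) (y : List Int) : List Int :=
  if y = [] then []
  else
    let left := sweep y
    let right := (sweep y.reverse).reverse
    (PySem.List.enumerate x).foldl
      (fun u (p : Int × Int) =>
        if p.2 ≠ 0 then
          match PySem.List.pyGetD left p.1 none, PySem.List.pyGetD right p.1 none with
          | none, none => u
          | none, some rt => u ++ [-rt]
          | some lf, none => u ++ [lf]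
          | some lf, some rt =>
            if lf < rt then u ++ [lf]
            else if rt < lf then u ++ [-rt]
            else
              let u1 := u ++ [lf]
              if lf ≠ 0 then u1 ++ [-lf] else u1
        else u) []

-- ===== PRECONDITION & SPEC =====
-- Pre_ excludes exactly the inputs on which A raises IndexError: a nonempty y together with a
-- nonzero sample value at an index ≥ len(y) (then A evaluates y[i - 0] out of range).
def Pre_sequence_distance (x : List Int) (y : List Int) : Prop :=
  y = [] ∨ ∀ a ∈ x.drop y.length, a = 0
instance (x : List Int) (y : List Int) : Decidable (Pre_sequence_distance x y) := by
  unfold Pre_sequence_distance; infer_instance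

def pvWitness_sequence_distance : List Int × List Int := ([1, 0, -2], [0, 3, 0, 1])

def Spec_sequence_distance (x : List Int) (y : List Int) (out : List Int) : Prop := out = sequence_distance_alt x y
instance (x : List Int) (y : List Int) (out : List Int) : Decidable (Spec_sequence_distance x y out) := by unfold Spec_sequence_distance; infer_instance

-- ===== CLAIM (what is proved, stated in full; the proofs are below) =====
def Claim_equal_sequence_distance : Prop := ∀ (x : List Int) (y : List Int), Dom_sequence_distance x y → Pre_sequence_distance x y → Spec_sequence_distance x y (sequence_distance x y)

-- ===== LEMMAS AND PROOFS =====

def nzIdx (l : List Int) : Option Nat := l.findIdx? (fun v => decide (v ≠ 0))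

def lastIdx (l : List Int) : Option Nat := (nzIdx l.reverse).map (fun k => l.length - 1 - k)

def dL (y : List Int) (i : Int) : Option Int :=
  (lastIdx (y.take (i.toNat + 1))).map (fun p : Nat => i - (p : Int))

def dR (y : List Int) (i : Int) : Option Int :=
  (nzIdx (y.drop i.toNat)).map (fun k : Nat => (k : Int))

def combine (lf rt : Option Int) : List Int :=
  match lf, rt with
  | none, none => []
  | none, some r => [-r]
  | some l, none => [l]
  | some l, some r =>
    if l < r then [l] else if r < l then [-r] else if l ≠ 0 then [l, -l] else [l]

lemma lastIdx_append (ys : List Int) (v : Int) :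
    lastIdx (ys ++ [v]) = if v ≠ 0 then some ys.length else lastIdx ys := by
  unfold lastIdx nzIdx
  rw [List.reverse_append]
  simp only [List.reverse_cons, List.reverse_nil, List.nil_append, List.cons_append,
    List.findIdx?_cons, List.length_append, List.length_cons, List.length_nil]
  by_cases hv : v ≠ 0
  · simp [hv]
  · simp only [ne_eq, not_not] at hv
    subst hv
    simp only [ne_eq, not_true_eq_false, decide_false, Bool.false_eq_true, if_false,
      Option.map_map]
    congr 1
    funext k
    simp only [Function.comp_apply]
    omega

lemma sweep_fold (y : List Int) :
    (PySem.List.enumerate y).foldl sweepStep (none, []) =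
      ((lastIdx y).map (fun p : Nat => (p : Int)),
       (List.range y.length).map
         (fun t => (lastIdx (y.take (t + 1))).map (fun p : Nat => ((t : Nat) : Int) - (p : Int)))) := by
  induction y using List.reverseRecOn with
  | nil => simp [lastIdx, nzIdx, PySem.List.enumerate]
  | append_singleton ys v ih =>
    rw [PySem.List.enumerate_append, List.foldl_append, ih]
    simp only [PySem.List.enumerate, List.foldl_cons, List.foldl_nil]
    rw [sweepStep]
    simp only [List.length_append, List.length_cons, List.length_nil, List.range_succ,
      List.map_append, List.map_cons, List.map_nil, lastIdx_append]
    refine Prod.ext ?_ ?_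
    · by_cases hv : v ≠ 0 <;> simp [hv]
    · simp only []
      congr 1
      · apply List.map_congr_left
        intro t ht
        rw [List.take_append_of_le_length (by simpa using List.mem_range.mp ht)]
      · rw [List.take_of_length_le (by simp), lastIdx_append]
        by_cases hv : v ≠ 0 <;>
          simp [hv, Function.comp_def]

lemma sweep_eq_map (y : List Int) :
    sweep y = (List.range y.length).map
      (fun t => (lastIdx (y.take (t + 1))).map (fun p : Nat => ((t : Nat) : Int) - (p : Int))) := by
  rw [sweep, sweep_fold]

lemma length_sweep (y : List Int) : (sweep y).length = y.length := by
  rw [sweep_eq_map]; simp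

lemma left_getD (y : List Int) (i : Int) (h0 : 0 ≤ i) (hn : i < (y.length : Int)) :
    PySem.List.pyGetD (sweep y) i none = dL y i := by
  have hi : i.toNat < y.length := by omega
  rw [PySem.List.pyGetD_eq_getElem _ _ h0 (by rw [length_sweep]; exact_mod_cast hn)]
  rw [List.getElem_eq_iff]
  rw [sweep_eq_map]
  simp only [List.getElem?_map, List.getElem?_range, hi, Option.map_some,
    Option.some.injEq, dL]
  congr 1
  funext p
  omega

lemma lastIdx_reverse (l : List Int) :
    lastIdx l.reverse = (nzIdx l).map (fun k => l.length - 1 - k) := by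
  rw [lastIdx, List.reverse_reverse, List.length_reverse]

lemma nzIdx_lt_length (l : List Int) (k : Nat) (h : nzIdx l = some k) : k < l.length := by
  rw [nzIdx, List.findIdx?_eq_some_iff_findIdx_eq] at h
  exact h.1

lemma right_getD (y : List Int) (i : Int) (h0 : 0 ≤ i) (hn : i < (y.length : Int)) :
    PySem.List.pyGetD ((sweep y.reverse).reverse) i none = dR y i := by
  have hi : i.toNat < y.length := by omega
  have hlen : (sweep y.reverse).length = y.length := by rw [length_sweep, List.length_reverse]
  rw [PySem.List.pyGetD_eq_getElem _ _ h0 (by simp only [List.length_reverse, hlen]; exact_mod_cast hn)]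
  rw [List.getElem_reverse, List.getElem_eq_iff, hlen]
  rw [sweep_eq_map]
  have hb : y.length - 1 - i.toNat < y.length := by omega
  simp only [List.getElem?_map, List.length_reverse, List.getElem?_range, hb,
    Option.map_some, Option.some.injEq]
  have htake : List.take (y.length - 1 - i.toNat + 1) y.reverse = (y.drop i.toNat).reverse := by
    have harg : y.length - (y.length - 1 - i.toNat + 1) = i.toNat := by omega
    rw [List.take_reverse, harg]
  rw [htake, lastIdx_reverse, dR]
  rcases hr : nzIdx (y.drop i.toNat) with _ | k
  · simp
  · have hk := nzIdx_lt_length _ _ hr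
    rw [List.length_drop] at hk
    simp
    omega

lemma nzIdx_spec_some (l : List Int) (k : Nat) (h : nzIdx l = some k) :
    ∃ hk : k < l.length, l[k] ≠ 0 ∧ ∀ j (hj : j < k), l[j]'(by omega) = 0 := by
  rw [nzIdx, List.findIdx?_eq_some_iff_getElem] at h
  obtain ⟨hk, h1, h2⟩ := h
  refine ⟨hk, by simpa using h1, fun j hj => ?_⟩
  have := h2 j hj
  simpa using this

lemma nzIdx_spec_none (l : List Int) (h : nzIdx l = none) : ∀ v ∈ l, v = 0 := by
  rw [nzIdx, List.findIdx?_eq_none_iff] at h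
  intro v hv
  simpa using h v hv

lemma dR_spec_some (y : List Int) (i r : Int) (h0 : 0 ≤ i)
    (h : dR y i = some r) :
    0 ≤ r ∧ i + r < (y.length : Int) ∧ PySem.List.pyGetD y (i + r) 0 ≠ 0 ∧
      ∀ j : Int, 0 ≤ j → j < r → i + j < (y.length : Int) → PySem.List.pyGetD y (i + j) 0 = 0 := by
  rw [dR] at h
  rcases hr : nzIdx (y.drop i.toNat) with _ | k
  · rw [hr] at h; simp at h
  · rw [hr] at h
    simp only [Option.map_some, Option.some.injEq] at h
    subst h
    obtain ⟨hk, h1, h2⟩ := nzIdx_spec_some _ _ hr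
    rw [List.length_drop] at hk
    have hget : ∀ (m : Nat) (hm : m < y.length - i.toNat),
        (y.drop i.toNat)[m]'(by rw [List.length_drop]; omega) = y[i.toNat + m]'(by omega) := by
      intro m hm
      rw [List.getElem_drop]
    refine ⟨by omega, by omega, ?_, ?_⟩
    · rw [PySem.List.pyGetD_eq_getElem _ _ (by omega) (by omega)]
      have e : (i + (k : Int)).toNat = i.toNat + k := by omega
      have h1' := h1
      rw [hget k (by omega)] at h1'
      simp only [e]
      exact h1'
    · intro j hj0 hjk hjn
      rw [PySem.List.pyGetD_eq_getElem _ _ (by omega) (by omega)]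
      have e : (i + j).toNat = i.toNat + j.toNat := by omega
      have h2' := h2 j.toNat (by omega)
      rw [hget j.toNat (by omega)] at h2'
      simp only [e]
      exact h2'

lemma dR_spec_none (y : List Int) (i : Int) (h0 : 0 ≤ i)
    (h : dR y i = none) :
    ∀ j : Int, 0 ≤ j → i + j < (y.length : Int) → PySem.List.pyGetD y (i + j) 0 = 0 := by
  rw [dR, Option.map_eq_none_iff] at h
  intro j hj0 hjn
  rw [PySem.List.pyGetD_eq_getElem _ _ (by omega) (by omega)]
  refine nzIdx_spec_none _ h _ ?_
  have hjt : (i + j).toNat = i.toNat + j.toNat := by omega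
  simp only [hjt]
  rw [← List.getElem_drop (i := i.toNat) (j := j.toNat)
    (h := by rw [List.length_drop]; omega)]
  exact List.getElem_mem _

lemma dL_spec_none (y : List Int) (i : Int) (h0 : 0 ≤ i) (hn : i < (y.length : Int))
    (h : dL y i = none) :
    ∀ j : Int, 0 ≤ j → j ≤ i → PySem.List.pyGetD y (i - j) 0 = 0 := by
  rw [dL, Option.map_eq_none_iff, lastIdx, Option.map_eq_none_iff] at h
  intro j hj0 hji
  have hq : (i - j).toNat < y.length := by omega
  rw [PySem.List.pyGetD_eq_getElem _ _ (by omega) (by omega)]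
  refine nzIdx_spec_none _ h _ ?_
  rw [List.mem_reverse]
  rw [← List.getElem_take (j := i.toNat + 1)
    (h := by rw [List.length_take]; omega)]
  exact List.getElem_mem _

lemma dL_spec_some (y : List Int) (i l : Int) (h0 : 0 ≤ i) (hn : i < (y.length : Int))
    (h : dL y i = some l) :
    0 ≤ l ∧ l ≤ i ∧ PySem.List.pyGetD y (i - l) 0 ≠ 0 ∧
      ∀ j : Int, 0 ≤ j → j < l → PySem.List.pyGetD y (i - j) 0 = 0 := by
  have hm : (y.take (i.toNat + 1)).length = i.toNat + 1 := by
    rw [List.length_take]; omega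
  rw [dL, lastIdx] at h
  rcases hr : nzIdx ((y.take (i.toNat + 1)).reverse) with _ | k
  · rw [hr] at h; simp at h
  · rw [hr] at h
    simp only [Option.map_some, Option.some.injEq, hm] at h
    obtain ⟨hk, h1, h2⟩ := nzIdx_spec_some _ _ hr
    rw [List.length_reverse, hm] at hk
    have hl : l = (k : Int) := by omega
    subst hl
    have hrevget : ∀ (j : Nat) (hj : j < i.toNat + 1),
        ((y.take (i.toNat + 1)).reverse)[j]'(by rw [List.length_reverse, hm]; omega)
          = y[i.toNat - j]'(by omega) := by
      intro j hj
      rw [List.getElem_reverse, List.getElem_take]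
      congr 1
      rw [hm]
      omega
    refine ⟨by omega, by omega, ?_, ?_⟩
    · rw [PySem.List.pyGetD_eq_getElem _ _ (by omega) (by omega)]
      have e : (i - (k : Int)).toNat = i.toNat - k := by omega
      have h1' := h1
      rw [hrevget k (by omega)] at h1'
      simp only [e]
      exact h1'
    · intro j hj0 hjl
      rw [PySem.List.pyGetD_eq_getElem _ _ (by omega) (by omega)]
      have e : (i - j).toNat = i.toNat - j.toNat := by omega
      have h2' := h2 j.toNat (by omega)
      rw [hrevget j.toNat (by omega)] at h2'
      simp only [e]
      exact h2'

lemma seqInnerA_no_hit (y : List Int) (i : Int) : ∀ (a : Int),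
    (∀ j : Int, a ≤ j → j < (y.length : Int) →
      ¬(0 ≤ i - j ∧ PySem.List.pyGetD y (i - j) 0 ≠ 0) ∧
      ¬(i + j < (y.length : Int) ∧ PySem.List.pyGetD y (i + j) 0 ≠ 0)) →
    seqInnerA y i (PySem.List.pyRange a y.length 1) = [] := by
  intro a
  induction hfuel : ((y.length : Int) - a).toNat generalizing a with
  | zero =>
    intro _
    rw [PySem.List.pyRange_one_eq_nil (by omega)]
    rfl
  | succ m ih =>
    intro H
    rw [PySem.List.pyRange_one_cons (by omega)]
    rw [seqInnerA]
    have ha := H a (le_refl a) (by omega)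
    rw [if_neg (by tauto), if_neg ha.1, if_neg ha.2]
    exact ih (a + 1) (by omega) (fun j h1 h2 => H j (by omega) h2)

lemma seqInnerA_hit (y : List Int) (i : Int) (j' : Int)
    (hj : j' < (y.length : Int))
    (Hhit : (0 ≤ i - j' ∧ PySem.List.pyGetD y (i - j') 0 ≠ 0) ∨
            (i + j' < (y.length : Int) ∧ PySem.List.pyGetD y (i + j') 0 ≠ 0)) :
    ∀ (a : Int), a ≤ j' →
    (∀ j : Int, a ≤ j → j < j' →
      ¬(0 ≤ i - j ∧ PySem.List.pyGetD y (i - j) 0 ≠ 0) ∧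
      ¬(i + j < (y.length : Int) ∧ PySem.List.pyGetD y (i + j) 0 ≠ 0)) →
    seqInnerA y i (PySem.List.pyRange a y.length 1) =
      if (0 ≤ i - j' ∧ PySem.List.pyGetD y (i - j') 0 ≠ 0) ∧
         (i + j' < (y.length : Int) ∧ PySem.List.pyGetD y (i + j') 0 ≠ 0) then
        if j' = 0 then [j'] else [j', -j']
      else if 0 ≤ i - j' ∧ PySem.List.pyGetD y (i - j') 0 ≠ 0 then [j']
      else [-j'] := by
  intro a
  induction hfuel : (j' - a).toNat generalizing a with
  | zero =>
    intro ha Hmin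
    have haj : a = j' := by omega
    subst haj
    rw [PySem.List.pyRange_one_cons (by omega)]
    rw [seqInnerA]
    by_cases hb : (0 ≤ i - a ∧ PySem.List.pyGetD y (i - a) 0 ≠ 0) ∧
         (i + a < (y.length : Int) ∧ PySem.List.pyGetD y (i + a) 0 ≠ 0)
    · rw [if_pos hb, if_pos hb]
    · rw [if_neg hb, if_neg hb]
      by_cases hL : 0 ≤ i - a ∧ PySem.List.pyGetD y (i - a) 0 ≠ 0
      · rw [if_pos hL, if_pos hL]
      · rw [if_neg hL, if_neg hL, if_pos (by tauto)]
  | succ m ih =>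
    intro ha Hmin
    rw [PySem.List.pyRange_one_cons (by omega)]
    rw [seqInnerA]
    have hne := Hmin a (le_refl a) (by omega)
    rw [if_neg (by tauto), if_neg hne.1, if_neg hne.2]
    exact ih (a + 1) (by omega) (by omega) (fun j h1 h2 => Hmin j (by omega) h2)

lemma inner_eq_combine (y : List Int) (i : Int) (h0 : 0 ≤ i) (hn : i < (y.length : Int)) :
    seqInnerA y i (PySem.List.pyRange 0 y.length 1) = combine (dL y i) (dR y i) := by
  rcases hl : dL y i with _ | l <;> rcases hr : dR y i with _ | r
  · -- none / none
    have HL := dL_spec_none y i h0 hn hl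
    have HR := dR_spec_none y i h0 hr
    rw [seqInnerA_no_hit y i 0 ?_]
    · rfl
    · intro j hj0 hjn
      constructor
      · rintro ⟨hge, hnz⟩
        exact hnz (HL j hj0 (by omega))
      · rintro ⟨hlt, hnz⟩
        exact hnz (HR j hj0 hlt)
  · -- none / some r
    have HL := dL_spec_none y i h0 hn hl
    obtain ⟨hr0, hrn, hrnz, hrmin⟩ := dR_spec_some y i r h0 hr
    rw [seqInnerA_hit y i r (by omega) (Or.inr ⟨hrn, hrnz⟩) 0 (by omega) ?_]
    · have hLr : ¬(0 ≤ i - r ∧ PySem.List.pyGetD y (i - r) 0 ≠ 0) := by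
        rintro ⟨hge, hnz⟩
        exact hnz (HL r hr0 (by omega))
      rw [if_neg (by tauto), if_neg hLr, combine]
    · intro j hj0 hjr
      constructor
      · rintro ⟨hge, hnz⟩
        exact hnz (HL j hj0 (by omega))
      · rintro ⟨hlt, hnz⟩
        exact hnz (hrmin j hj0 hjr hlt)
  · -- some l / none
    have HR := dR_spec_none y i h0 hr
    obtain ⟨hl0, hli, hlnz, hlmin⟩ := dL_spec_some y i l h0 hn hl
    rw [seqInnerA_hit y i l (by omega) (Or.inl ⟨by omega, hlnz⟩) 0 (by omega) ?_]
    · have hRl : ¬(i + l < (y.length : Int) ∧ PySem.List.pyGetD y (i + l) 0 ≠ 0) := by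
        rintro ⟨hlt, hnz⟩
        exact hnz (HR l hl0 hlt)
      rw [if_neg (by tauto), if_pos ⟨by omega, hlnz⟩, combine]
    · intro j hj0 hjl
      constructor
      · rintro ⟨hge, hnz⟩
        exact hnz (hlmin j hj0 hjl)
      · rintro ⟨hlt, hnz⟩
        exact hnz (HR j hj0 hlt)
  · -- some l / some r
    obtain ⟨hl0, hli, hlnz, hlmin⟩ := dL_spec_some y i l h0 hn hl
    obtain ⟨hr0, hrn, hrnz, hrmin⟩ := dR_spec_some y i r h0 hr
    rcases lt_trichotomy l r with hlr | hlr | hlr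
    · -- l < r : stop at l, left only
      rw [seqInnerA_hit y i l (by omega) (Or.inl ⟨by omega, hlnz⟩) 0 (by omega) ?_]
      · have hRl : ¬(i + l < (y.length : Int) ∧ PySem.List.pyGetD y (i + l) 0 ≠ 0) := by
          rintro ⟨hlt, hnz⟩
          exact hnz (hrmin l hl0 hlr hlt)
        rw [if_neg (by tauto), if_pos ⟨by omega, hlnz⟩, combine, if_pos hlr]
      · intro j hj0 hjl
        exact ⟨fun ⟨hge, hnz⟩ => hnz (hlmin j hj0 hjl),
               fun ⟨hlt, hnz⟩ => hnz (hrmin j hj0 (by omega) hlt)⟩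
    · -- l = r : both hit at l
      subst hlr
      rw [seqInnerA_hit y i l (by omega) (Or.inl ⟨by omega, hlnz⟩) 0 (by omega) ?_]
      · rw [if_pos ⟨⟨by omega, hlnz⟩, ⟨hrn, hrnz⟩⟩, combine]
        by_cases hz : l = 0 <;> simp [hz]
      · intro j hj0 hjl
        exact ⟨fun ⟨hge, hnz⟩ => hnz (hlmin j hj0 hjl),
               fun ⟨hlt, hnz⟩ => hnz (hrmin j hj0 hjl hlt)⟩
    · -- r < l : stop at r, right only
      rw [seqInnerA_hit y i r (by omega) (Or.inr ⟨hrn, hrnz⟩) 0 (by omega) ?_]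
      · have hLr : ¬(0 ≤ i - r ∧ PySem.List.pyGetD y (i - r) 0 ≠ 0) := by
          rintro ⟨hge, hnz⟩
          exact hnz (hlmin r hr0 hlr)
        rw [if_neg (by tauto), if_neg hLr, combine, if_neg (by omega), if_pos hlr]
      · intro j hj0 hjr
        exact ⟨fun ⟨hge, hnz⟩ => hnz (hlmin j hj0 (by omega)),
               fun ⟨hlt, hnz⟩ => hnz (hrmin j hj0 hjr hlt)⟩

lemma b_body_eq (left right : List (Option Int)) (u : List Int) (j v : Int) :
    (if v ≠ 0 then
        match PySem.List.pyGetD left j none, PySem.List.pyGetD right j none with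
        | none, none => u
        | none, some rt => u ++ [-rt]
        | some lf, none => u ++ [lf]
        | some lf, some rt =>
          if lf < rt then u ++ [lf]
          else if rt < lf then u ++ [-rt]
          else
            let u1 := u ++ [lf]
            if lf ≠ 0 then u1 ++ [-lf] else u1
      else u)
    = u ++ (if v ≠ 0 then
        combine (PySem.List.pyGetD left j none) (PySem.List.pyGetD right j none) else []) := by
  by_cases hv : v ≠ 0
  · rw [if_pos hv, if_pos hv]
    rcases PySem.List.pyGetD left j none with _ | lf <;>
      rcases PySem.List.pyGetD right j none with _ | rt <;>
      simp only [combine]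
    · simp
    · split_ifs <;> simp
  · rw [if_neg hv, if_neg hv, List.append_nil]

lemma main_eq (x : List Int) (y : List Int) (hpre : Pre_sequence_distance x y) :
    sequence_distance x y = sequence_distance_alt x y := by
  by_cases hy : y = []
  · subst hy
    rw [sequence_distance, sequence_distance_alt, if_pos rfl]
    rw [PySem.List.foldl_congr_mem _ _ (fun u _ => u) []
      (by
        intro acc j _
        rw [List.length_nil, PySem.List.pyRange_one_eq_nil (by omega), seqInnerA]
        simp)]
    exact List.foldl_fixed' (fun _ => rfl) _
  · have hdrop : ∀ a ∈ x.drop y.length, a = 0 := hpre.resolve_left hy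
    have hkey : ∀ j : Int, 0 ≤ j → j < (x.length : Int) →
        PySem.List.pyGetD x j 0 ≠ 0 → j < (y.length : Int) := by
      intro j hj0 hjx hnz
      by_contra hge
      apply hnz
      rw [PySem.List.pyGetD_eq_getElem _ _ hj0 hjx]
      have hx : (x.drop y.length)[j.toNat - y.length]'(by rw [List.length_drop]; omega)
          = x[j.toNat]'(by omega) := by
        rw [List.getElem_drop]
        congr 1
        omega
      have hmem : (x.drop y.length)[j.toNat - y.length]'(by rw [List.length_drop]; omega)
          ∈ x.drop y.length := List.getElem_mem _
      have hz := hdrop _ hmem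
      rw [hx] at hz
      exact hz
    rw [sequence_distance]
    simp only [sequence_distance_alt, if_neg hy]
    conv_lhs => rw [PySem.List.foldl_congr_mem _ _
      (fun u j => u ++ (if PySem.List.pyGetD x j 0 ≠ 0 then
        seqInnerA y j (PySem.List.pyRange 0 y.length 1) else [])) []
      (by
        intro acc j _
        by_cases hc : PySem.List.pyGetD x j 0 ≠ 0
        · simp only [if_pos hc]
        · simp only [if_neg hc, List.append_nil])]
    conv_lhs => rw [PySem.List.foldl_append_eq_flatMap]
    conv_rhs => rw [PySem.List.enumerate_eq_map_pyRange x 0, List.foldl_map]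
    conv_rhs => rw [PySem.List.foldl_congr_mem _ _
      (fun u j => u ++ (if PySem.List.pyGetD x j 0 ≠ 0 then
        combine (PySem.List.pyGetD (sweep y) j none)
          (PySem.List.pyGetD ((sweep y.reverse).reverse) j none) else [])) []
      (by
        intro acc j _
        exact b_body_eq (sweep y) ((sweep y.reverse).reverse) acc j (PySem.List.pyGetD x j 0))]
    conv_rhs => rw [PySem.List.foldl_append_eq_flatMap]
    simp only [List.nil_append, PySem.List.len_eq]
    rw [List.flatMap_def, List.flatMap_def]
    congr 1
    apply List.map_congr_left
    intro j hj
    have hmem := (PySem.List.mem_pyRange_one).mp hj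
    obtain ⟨hj0, hjx⟩ := hmem
    by_cases hc : PySem.List.pyGetD x j 0 ≠ 0
    · have hjy := hkey j hj0 hjx hc
      rw [if_pos hc, if_pos hc]
      rw [left_getD y j hj0 hjy, right_getD y j hj0 hjy]
      exact inner_eq_combine y j hj0 hjy
    · rw [if_neg hc, if_neg hc]

-- ===== VERDICT (by name: the statement is the Claim_ definition above) =====
theorem sequence_distance_spec : Claim_equal_sequence_distance := by
  intro x y _ hpre
  unfold Spec_sequence_distance
  exact main_eq x y hpre
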